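-- pv_equiv track=rewrite | github.com/naqushab/ScalerAcademy | Scaler/Advanced/Arrays - III/A1.py | solve
-- ===== SOURCE A (Python) =====
-- def solve(A):
--     n = len(A)
--     sum = 0
--     for i in range(n):
--         for j in range(n):
--             tc = (i+1)*(j+1)
--             br = (n-i)*(n-j)
--             sub = tc*br
--             sum += sub*A[i][j]
--     return sum
-- ===== SOURCE B (Python) =====
-- def solve(A):
--     # Summation by parts: sum((i+1)(j+1)(n-i)(n-j)*A[i][j]) equals the same
--     # linear transform applied twice: T(x)[.] = sum over v of (2v-n) * prefix_v(x),
--     # since sum_{v>j}(2v-n) = (j+1)(n-j).  First transform each row via a running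
--     # prefix sum, then transform the resulting column of row scores the same way.
--     n = len(A)
--     row_scores = []
--     for i in range(n):
--         p = 0
--         score = 0
--         for v in range(1, n + 1):
--             p += A[i][v - 1]
--             score += (2 * v - n) * p
--         row_scores.append(score)
--     q = 0
--     total = 0
--     for u in range(1, n + 1):
--         q += row_scores[u - 1]
--         total += (2 * u - n) * q
--     return total
-- ===== Notes on version B (the rewrite author's own statement) =====
-- stated objective: alternative
-- what changed: Instead of multiplying each cell by the quadratic weight (i+1)(j+1)(n-i)(n-j), B uses summation by parts: a prefix-sum scan weighted by the linear coefficients (2v-n) is applied to every row and then again to the list of row scores, which yields the same total because the tail sum of (2v-n) is (j+1)(n-j).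
import Mathlib
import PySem

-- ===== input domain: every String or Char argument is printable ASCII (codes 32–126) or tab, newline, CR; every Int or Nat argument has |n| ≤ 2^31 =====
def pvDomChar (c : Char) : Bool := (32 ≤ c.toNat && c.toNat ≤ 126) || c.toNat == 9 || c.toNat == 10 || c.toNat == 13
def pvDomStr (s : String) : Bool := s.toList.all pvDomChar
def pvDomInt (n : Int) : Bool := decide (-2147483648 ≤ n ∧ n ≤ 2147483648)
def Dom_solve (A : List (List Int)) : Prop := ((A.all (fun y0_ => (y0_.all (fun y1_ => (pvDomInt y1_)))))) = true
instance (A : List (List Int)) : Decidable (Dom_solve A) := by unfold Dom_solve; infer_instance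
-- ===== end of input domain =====

-- B replaces A's per-cell quadratic weights (i+1)(j+1)(n-i)(n-j) by summation by
-- parts: a running prefix-sum transform with linear coefficients (2v-n), applied
-- first to each row and then to the list of row scores (alternative algorithm).

-- ===== PORT A =====
def solve (A : List (List Int)) : Int :=
  let n : Int := A.length
  (PySem.List.pyRange 0 n 1).foldl (fun sum i =>
    (PySem.List.pyRange 0 n 1).foldl (fun sum j =>
      let tc := (i + 1) * (j + 1)
      let br := (n - i) * (n - j)
      let sub := tc * br
      sum + sub * (PySem.List.pyGetD (PySem.List.pyGetD A i []) j 0)) sum) 0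

-- ===== PORT B =====
def solve_alt (A : List (List Int)) : Int :=
  let n : Int := A.length
  let row_scores := (PySem.List.pyRange 0 n 1).foldl (fun rs i =>
      let ps := (PySem.List.pyRange 1 (n + 1) 1).foldl
        (fun (ps : Int × Int) v =>
          let p := ps.1 + PySem.List.pyGetD (PySem.List.pyGetD A i []) (v - 1) 0
          (p, ps.2 + (2 * v - n) * p)) (0, 0)
      rs ++ [ps.2]) []
  let qt := (PySem.List.pyRange 1 (n + 1) 1).foldl
      (fun (qt : Int × Int) u =>
        let q := qt.1 + PySem.List.pyGetD row_scores (u - 1) 0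
        (q, qt.2 + (2 * u - n) * q)) (0, 0)
  qt.2

-- ===== PRECONDITION & SPEC =====
-- Pre_ excludes ragged matrices (some row shorter than len(A)): there both the
-- Python A and the Python B raise IndexError on A[i][j].
def Pre_solve (A : List (List Int)) : Prop := ∀ row ∈ A, A.length ≤ row.length
instance (A : List (List Int)) : Decidable (Pre_solve A) := by unfold Pre_solve; infer_instance
def pvWitness_solve : List (List Int) := [[1, 2], [3, 4]]
def Spec_solve (A : List (List Int)) (out : Int) : Prop := out = solve_alt A
instance (A : List (List Int)) (out : Int) : Decidable (Spec_solve A out) := by unfold Spec_solve; infer_instance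

-- ===== CLAIM (what is proved, stated in full; the proofs are below) =====
def Claim_equal_solve : Prop := ∀ (A : List (List Int)), Dom_solve A → Pre_solve A → Spec_solve A (solve A)

-- ===== LEMMAS AND PROOFS =====

-- The scan loop of B: after folding over [1..m] the state is (prefix sum, score),
-- the score being the coefficient-weighted sum of all prefix sums.
lemma pv_scan (g c : Int → Int) (m : Nat) :
    ((List.range m).map (fun (k : Nat) => 1 + (k:Int))).foldl
      (fun (ps : Int × Int) v => (ps.1 + g v, ps.2 + c v * (ps.1 + g v))) ((0:Int), (0:Int))
    = (∑ k ∈ Finset.range m, g (1+(k:Int)),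
       ∑ k ∈ Finset.range m, c (1+(k:Int)) * ∑ w ∈ Finset.range (k+1), g (1+(w:Int))) := by
  induction m with
  | zero => simp
  | succ m ih =>
    rw [List.range_succ, List.map_append, List.foldl_append, ih]
    simp [Finset.sum_range_succ]

-- Summation by parts: weighting prefix sums by c equals weighting each value by
-- the tail sum of c.
lemma pv_swap (g c : Int → Int) (m : Nat) :
    ∑ k ∈ Finset.range m, c (1+(k:Int)) * ∑ w ∈ Finset.range (k+1), g (1+(w:Int))
    = ∑ w ∈ Finset.range m, g (1+(w:Int)) * ∑ k ∈ Finset.Ico w m, c (1+(k:Int)) := by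
  induction m with
  | zero => simp
  | succ m ih =>
    rw [Finset.sum_range_succ, ih,
        Finset.sum_range_succ (fun w => g (1+(w:Int)) * ∑ k ∈ Finset.Ico w (m+1), c (1+(k:Int)))]
    have h1 : ∑ w ∈ Finset.range m, g (1+(w:Int)) * ∑ k ∈ Finset.Ico w (m+1), c (1+(k:Int))
        = ∑ w ∈ Finset.range m, (g (1+(w:Int)) * ∑ k ∈ Finset.Ico w m, c (1+(k:Int)) + g (1+(w:Int)) * c (1+(m:Int))) := by
      refine Finset.sum_congr rfl fun w hw => ?_
      rw [Finset.sum_Ico_succ_top (Nat.le_of_lt (Finset.mem_range.mp hw)), mul_add]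
    rw [h1, Finset.sum_add_distrib, Finset.sum_range_succ (fun k => g (1+(k:Int))),
        ← Finset.sum_mul]
    have h3 : ∑ k ∈ Finset.Ico m (m+1), c (1+(k:Int)) = c (1+(m:Int)) := by
      rw [Finset.sum_Ico_succ_top le_rfl, Finset.Ico_self, Finset.sum_empty, zero_add]
    rw [h3]; ring

lemma pv_gauss (M : Nat) : (∑ t ∈ Finset.range M, (t:Int)) * 2 = (M:Int) * ((M:Int) - 1) := by
  induction M with
  | zero => simp
  | succ M ih =>
    rw [Finset.sum_range_succ]
    push_cast
    linear_combination ih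

-- The tail sum of the linear coefficients 2v-N is A's quadratic weight (w+1)(N-w).
lemma pv_coeff (N w : Nat) (hw : w ≤ N) :
    ∑ k ∈ Finset.Ico w N, (2*(1+(k:Int)) - (N:Int)) = ((w:Int)+1) * ((N:Int)-(w:Int)) := by
  rw [Finset.sum_Ico_eq_sum_range]
  have hM : ((N - w : Nat):Int) = (N:Int) - (w:Int) := by
    push_cast [Nat.cast_sub hw]; ring
  have hc : ∀ t ∈ Finset.range (N - w), (2*(1+((w + t : Nat):Int)) - (N:Int)) = 2*(t:Int) + (2+2*(w:Int)-(N:Int)) := by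
    intro t _; push_cast; ring
  rw [Finset.sum_congr rfl hc, Finset.sum_add_distrib, Finset.sum_const, ← Finset.mul_sum,
      Finset.card_range, nsmul_eq_mul, hM]
  have hg := pv_gauss (N - w)
  rw [hM] at hg
  linear_combination hg

-- B's one-dimensional transform computes the (w+1)(N-w)-weighted sum of its values.
lemma pv_transform (g : Int → Int) (N : Nat) :
    (((List.range N).map (fun (k : Nat) => 1 + (k:Int))).foldl
      (fun (ps : Int × Int) v => (ps.1 + g v, ps.2 + (2*v - (N:Int)) * (ps.1 + g v))) ((0:Int),(0:Int))).2
    = ∑ w ∈ Finset.range N, g (1+(w:Int)) * (((w:Int)+1) * ((N:Int)-(w:Int))) := by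
  rw [pv_scan g (fun v => 2*v - (N:Int)) N]
  show ∑ k ∈ Finset.range N, (2*(1+(k:Int)) - (N:Int)) * ∑ w ∈ Finset.range (k+1), g (1+(w:Int)) = _
  rw [pv_swap g (fun v => 2*v - (N:Int)) N]
  refine Finset.sum_congr rfl fun w hw => ?_
  rw [pv_coeff N w (Nat.le_of_lt (Finset.mem_range.mp hw))]

lemma pv_list_range_sum (m : Nat) (f : Nat → Int) :
    ((List.range m).map f).sum = ∑ k ∈ Finset.range m, f k := by
  rfl

lemma pv_main (A : List (List Int)) : solve A = solve_alt A := by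
  unfold solve solve_alt
  dsimp only
  have hr : PySem.List.pyRange 1 ((A.length:Int)+1) 1 = (List.range A.length).map (fun k : Nat => 1 + (k:Int)) := by
    rw [PySem.List.pyRange_one]
    norm_num
  rw [hr]
  rw [PySem.List.foldl_append_singleton_eq_map]
  rw [pv_transform (fun u => PySem.List.pyGetD (List.nil ++ (PySem.List.pyRange 0 (A.length:Int) 1).map (fun i => (((List.range A.length).map (fun k : Nat => 1 + (k:Int))).foldl (fun (ps : Int × Int) v => (ps.1 + PySem.List.pyGetD (PySem.List.pyGetD A i []) (v - 1) 0, ps.2 + (2 * v - (A.length:Int)) * (ps.1 + PySem.List.pyGetD (PySem.List.pyGetD A i []) (v - 1) 0))) (0, 0)).2)) (u - 1) 0) A.length]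
  simp only [List.nil_append]
  have hIdx : ∀ (x:Int), 1 + x - 1 = x := by intro x; ring
  simp only [hIdx]
  rw [Finset.sum_congr rfl (fun w hw => by
    rw [PySem.List.pyGetD_map_pyRange_of_nonneg _ _ _ _ (Int.natCast_nonneg w)
          (by exact_mod_cast Finset.mem_range.mp hw),
        pv_transform (fun v => PySem.List.pyGetD (PySem.List.pyGetD A (w:Int) []) (v - 1) 0) A.length])]
  simp only [hIdx]
  simp only [PySem.List.foldl_add, zero_add, PySem.List.pyRange_zero_natCast, List.map_map,
    Function.comp, pv_list_range_sum]
  refine Finset.sum_congr rfl fun i hi => ?_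
  rw [Finset.sum_mul]
  refine Finset.sum_congr rfl fun j hj => ?_
  ring

-- ===== VERDICT (by name: the statement is the Claim_ definition above) =====
theorem solve_spec : Claim_equal_solve := by
  intro A _ _
  unfold Spec_solve
  exact pv_main A
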